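-- pv_equiv track=rewrite | github.com/stephendor/TDL | trajectory_tda/validation/zigzag_null_tests.py | _recession_alignment_score
-- ===== SOURCE A (Python) =====
-- RECESSION_YEARS = {1993, 2008, 2009, 2020}
--
-- def _recession_alignment_score(
--     h0_bars: list[dict],
--     recession_years: set[int] = RECESSION_YEARS,
--     window: int = 1,
-- ) -> int:
--     """Count H₀ bars whose birth or death aligns with recession years.
--
--     Args:
--         h0_bars: List of dicts with 'birth_year' and 'death_year' keys.
--         recession_years: Set of recession year integers.
--         window: Alignment tolerance in years.
--
--     Returns:
--         Count of bars with at least one endpoint near a recession year.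
--     """
--     score = 0
--     for bar in h0_bars:
--         birth = bar.get("birth_year")
--         death = bar.get("death_year")
--         aligned = False
--         for ry in recession_years:
--             if birth is not None and abs(birth - ry) <= window:
--                 aligned = True
--             if death is not None and abs(death - ry) <= window:
--                 aligned = True
--         if aligned:
--             score += 1
--     return score
-- ===== SOURCE B (Python) =====
-- RECESSION_YEARS = {1993, 2008, 2009, 2020}
--
--
-- def _recession_alignment_score(
--     h0_bars: list[dict],
--     recession_years: set[int] = RECESSION_YEARS,
--     window: int = 1,
-- ) -> int:
--     """Count H0 bars with at least one endpoint within `window` of a recession year.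
--
--     Loop-swapped variant: extract the (birth, death) endpoint pairs once, iterate
--     recession years on the outside and accumulate the set of indices of aligned
--     bars; the answer is the size of that set.
--     """
--     endpoints = [(bar.get("birth_year"), bar.get("death_year")) for bar in h0_bars]
--     aligned_indices = set()
--     for ry in recession_years:
--         for i, (birth, death) in enumerate(endpoints):
--             if (birth is not None and abs(birth - ry) <= window) or (
--                 death is not None and abs(death - ry) <= window
--             ):
--                 aligned_indices.add(i)
--     return len(aligned_indices)
-- ===== Notes on version B (the rewrite author's own statement) =====
-- stated objective: alternative
-- what changed: B extracts the (birth, death) endpoint pairs in one preliminary pass, swaps the loop nesting (recession years outer, bars inner) and replaces the per-bar boolean flag and counter by a set of aligned bar indices accumulated across years, returning its size.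
import Mathlib
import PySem

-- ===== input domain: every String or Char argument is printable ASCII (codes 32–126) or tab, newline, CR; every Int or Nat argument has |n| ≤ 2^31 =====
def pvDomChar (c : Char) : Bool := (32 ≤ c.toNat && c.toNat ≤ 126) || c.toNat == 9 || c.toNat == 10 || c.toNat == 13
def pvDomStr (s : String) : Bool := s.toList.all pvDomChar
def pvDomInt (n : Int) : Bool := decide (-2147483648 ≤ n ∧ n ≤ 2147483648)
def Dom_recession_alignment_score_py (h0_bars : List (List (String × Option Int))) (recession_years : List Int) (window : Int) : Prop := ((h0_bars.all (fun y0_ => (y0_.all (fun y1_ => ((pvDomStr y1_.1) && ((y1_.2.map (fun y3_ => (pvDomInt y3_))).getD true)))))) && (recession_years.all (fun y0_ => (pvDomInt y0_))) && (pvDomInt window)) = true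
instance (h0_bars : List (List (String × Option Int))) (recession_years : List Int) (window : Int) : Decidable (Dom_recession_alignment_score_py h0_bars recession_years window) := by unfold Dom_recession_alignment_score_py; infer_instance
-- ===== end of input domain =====

-- B swaps the loop nesting (recession years outer, bars inner) and counts via a set of
-- aligned bar indices instead of a per-bar flag and counter; same cost, different structure.


-- ===== PORT A =====
def recession_alignment_score_py (h0_bars : List (List (String × Option Int))) (recession_years : List Int) (window : Int) : Int :=
  h0_bars.foldl (fun score bar =>
    let birth := (PySem.Dict.get? ⟨bar⟩ "birth_year").join
    let death := (PySem.Dict.get? ⟨bar⟩ "death_year").join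
    let aligned := recession_years.foldl (fun al ry =>
      let al := if birth.any (fun b => decide (|b - ry| ≤ window)) then true else al
      let al := if death.any (fun d => decide (|d - ry| ≤ window)) then true else al
      al) false
    if aligned then score + 1 else score) 0

-- ===== PORT B =====
-- B-side helper: the (birth, death) endpoint pair of a bar
def pvEndpoints (bar : List (String × Option Int)) : Option Int × Option Int :=
  ((PySem.Dict.get? ⟨bar⟩ "birth_year").join, (PySem.Dict.get? ⟨bar⟩ "death_year").join)

-- B-side helper: is one of the endpoints within `window` of `ry`?
def pvNear (e : Option Int × Option Int) (ry : Int) (window : Int) : Bool :=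
  e.1.any (fun b => decide (|b - ry| ≤ window)) || e.2.any (fun d => decide (|d - ry| ≤ window))

def recession_alignment_score_py_alt (h0_bars : List (List (String × Option Int))) (recession_years : List Int) (window : Int) : Int :=
  let endpoints := h0_bars.map pvEndpoints
  let aligned_indices : PySem.Set Int :=
    recession_years.foldl (fun s ry =>
      (PySem.List.enumerate endpoints).foldl (fun s p =>
        if pvNear p.2 ry window then PySem.Set.add s p.1 else s) s)
      PySem.Set.empty
  PySem.Set.len aligned_indices

-- ===== PRECONDITION & SPEC =====
def Spec_recession_alignment_score_py (h0_bars : List (List (String × Option Int))) (recession_years : List Int) (window : Int) (out : Int) : Prop := out = recession_alignment_score_py_alt h0_bars recession_years window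
instance (h0_bars : List (List (String × Option Int))) (recession_years : List Int) (window : Int) (out : Int) : Decidable (Spec_recession_alignment_score_py h0_bars recession_years window out) := by unfold Spec_recession_alignment_score_py; infer_instance

-- ===== CLAIM (what is proved, stated in full; the proofs are below) =====
def Claim_equal_recession_alignment_score_py : Prop := ∀ (h0_bars : List (List (String × Option Int))) (recession_years : List Int) (window : Int), Dom_recession_alignment_score_py h0_bars recession_years window → Spec_recession_alignment_score_py h0_bars recession_years window (recession_alignment_score_py h0_bars recession_years window)

-- ===== LEMMAS AND PROOFS =====

-- the per-bar predicate both programs decide: some endpoint is near some recession year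
def pvAligned (years : List Int) (window : Int) (e : Option Int × Option Int) : Bool :=
  years.any (fun ry => pvNear e ry window)

-- A's inner loop computes the flag `al || pvAligned`
lemma a_inner (years : List Int) (window : Int) (birth death : Option Int) (al : Bool) :
    years.foldl (fun al ry =>
      let al := if birth.any (fun b => decide (|b - ry| ≤ window)) then true else al
      let al := if death.any (fun d => decide (|d - ry| ≤ window)) then true else al
      al) al
    = (al || years.any (fun ry =>
        birth.any (fun b => decide (|b - ry| ≤ window)) || death.any (fun d => decide (|d - ry| ≤ window)))) := by
  induction years generalizing al with
  | nil => simp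
  | cons ry ys ih =>
      simp only [List.foldl_cons, List.any_cons, ih]
      cases hb : birth.any (fun b => decide (|b - ry| ≤ window)) <;>
        cases hd : death.any (fun d => decide (|d - ry| ≤ window)) <;> simp

-- A counts the bars satisfying pvAligned
lemma a_eq_countP (bars : List (List (String × Option Int))) (years : List Int) (window : Int) (score : Int) :
    bars.foldl (fun score bar =>
      let birth := (PySem.Dict.get? ⟨bar⟩ "birth_year").join
      let death := (PySem.Dict.get? ⟨bar⟩ "death_year").join
      let aligned := years.foldl (fun al ry =>
        let al := if birth.any (fun b => decide (|b - ry| ≤ window)) then true else al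
        let al := if death.any (fun d => decide (|d - ry| ≤ window)) then true else al
        al) false
      if aligned then score + 1 else score) score
    = score + (bars.countP (fun bar => pvAligned years window (pvEndpoints bar)) : Int) := by
  induction bars generalizing score with
  | nil => simp
  | cons bar bs ih =>
      simp only [List.foldl_cons]
      rw [a_inner]
      simp only [Bool.false_or]
      have hcond : (years.any (fun ry =>
          ((PySem.Dict.get? ⟨bar⟩ "birth_year").join.any (fun b => decide (|b - ry| ≤ window)) ||
           (PySem.Dict.get? ⟨bar⟩ "death_year").join.any (fun d => decide (|d - ry| ≤ window)))))
          = pvAligned years window (pvEndpoints bar) := rfl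
      rw [hcond, ih, List.countP_cons]
      cases pvAligned years window (pvEndpoints bar)
      · simp
      · simp
        omega

-- membership after B's inner loop over the enumerated bars
lemma b_inner_mem (l : List (Int × (Option Int × Option Int))) (ry window : Int) (s : PySem.Set Int) (j : Int) :
    j ∈ l.foldl (fun s p => if pvNear p.2 ry window then PySem.Set.add s p.1 else s) s
      ↔ j ∈ s ∨ ∃ p ∈ l, pvNear p.2 ry window ∧ j = p.1 := by
  induction l generalizing s with
  | nil => simp
  | cons p ps ih =>
      simp only [List.foldl_cons]
      by_cases h : pvNear p.2 ry window = true
      · rw [if_pos h, ih]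
        simp only [PySem.Set.mem_add, List.exists_mem_cons_iff, h]
        tauto
      · rw [if_neg h, ih]
        simp only [List.exists_mem_cons_iff]
        tauto

-- B's inner loop preserves Nodup
lemma b_inner_nodup (l : List (Int × (Option Int × Option Int))) (ry window : Int) (s : PySem.Set Int)
    (hs : s.Nodup) :
    (l.foldl (fun s p => if pvNear p.2 ry window then PySem.Set.add s p.1 else s) s).Nodup := by
  induction l generalizing s with
  | nil => exact hs
  | cons p ps ih =>
      simp only [List.foldl_cons]
      by_cases h : pvNear p.2 ry window = true
      · simp only [h, if_pos]; exact ih _ (PySem.Set.nodup_add _ _ hs)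
      · rw [if_neg h]; exact ih _ hs

-- membership after B's outer loop
lemma b_outer_mem (years : List Int) (window : Int) (l : List (Int × (Option Int × Option Int)))
    (s : PySem.Set Int) (j : Int) :
    j ∈ years.foldl (fun s ry =>
        l.foldl (fun s p => if pvNear p.2 ry window then PySem.Set.add s p.1 else s) s) s
      ↔ j ∈ s ∨ ∃ p ∈ l, pvAligned years window p.2 ∧ j = p.1 := by
  induction years generalizing s with
  | nil => simp [pvAligned]
  | cons ry ys ih =>
      simp only [List.foldl_cons, ih, b_inner_mem, pvAligned, List.any_cons]
      constructor
      · rintro ((hs | ⟨p, hp, hn, rfl⟩) | ⟨p, hp, ha, rfl⟩)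
        · exact Or.inl hs
        · exact Or.inr ⟨p, hp, by simp [hn], rfl⟩
        · exact Or.inr ⟨p, hp, by simp_all [pvAligned], rfl⟩
      · rintro (hs | ⟨p, hp, ha, rfl⟩)
        · exact Or.inl (Or.inl hs)
        · rcases Bool.or_eq_true_iff.mp ha with h1 | h2
          · exact Or.inl (Or.inr ⟨p, hp, h1, rfl⟩)
          · exact Or.inr ⟨p, hp, h2, rfl⟩

-- B's outer loop preserves Nodup
lemma b_outer_nodup (years : List Int) (window : Int) (l : List (Int × (Option Int × Option Int)))
    (s : PySem.Set Int) (hs : s.Nodup) :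
    (years.foldl (fun s ry =>
        l.foldl (fun s p => if pvNear p.2 ry window then PySem.Set.add s p.1 else s) s) s).Nodup := by
  induction years generalizing s with
  | nil => exact hs
  | cons ry ys ih => exact ih _ (b_inner_nodup _ _ _ _ hs)

-- ===== VERDICT (by name: the statement is the Claim_ definition above) =====
theorem recession_alignment_score_py_spec : Claim_equal_recession_alignment_score_py := by
  intro bars years window _
  unfold Spec_recession_alignment_score_py recession_alignment_score_py recession_alignment_score_py_alt
  rw [a_eq_countP]
  simp only [Int.zero_add]
  set enum := PySem.List.enumerate (bars.map pvEndpoints) with henum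
  set final := years.foldl (fun s ry =>
      enum.foldl (fun s p => if pvNear p.2 ry window then PySem.Set.add s p.1 else s) s)
      PySem.Set.empty with hfinal
  -- the reference list of aligned indices
  set C := (enum.filter (fun p => pvAligned years window p.2)).map (fun p => p.1) with hC
  have hCnodup : C.Nodup := by
    have h1 : C.Sublist (enum.map (fun p => p.1)) :=
      List.Sublist.map _ List.filter_sublist
    have h2 : (enum.map (fun p => p.1)).Nodup := by
      rw [henum, PySem.List.map_fst_enumerate]
      exact PySem.List.nodup_pyRange_one _ _
    exact h2.sublist h1
  have hfnodup : final.Nodup := b_outer_nodup _ _ _ _ (by simp [PySem.Set.empty])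
  have hmem : ∀ j, j ∈ final ↔ j ∈ C := by
    intro j
    rw [hfinal, b_outer_mem]
    simp only [PySem.Set.empty, List.not_mem_nil, false_or, hC, List.mem_map, List.mem_filter]
    constructor
    · rintro ⟨p, hp, ha, rfl⟩; exact ⟨p, ⟨hp, ha⟩, rfl⟩
    · rintro ⟨p, ⟨hp, ha⟩, rfl⟩; exact ⟨p, hp, ha, rfl⟩
  have hperm : final.Perm C := (List.perm_ext_iff_of_nodup hfnodup hCnodup).mpr hmem
  have hlen : final.length = C.length := hperm.length_eq
  have hClen : C.length = bars.countP (fun bar => pvAligned years window (pvEndpoints bar)) := by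
    rw [hC, List.length_map, ← List.countP_eq_length_filter]
    have : bars.countP (fun bar => pvAligned years window (pvEndpoints bar))
        = List.countP (fun p => pvAligned years window p.2) enum := by
      conv_rhs => rw [henum]
      conv_lhs => rw [show bars.countP (fun bar => pvAligned years window (pvEndpoints bar))
            = (bars.map pvEndpoints).countP (pvAligned years window) by
          rw [List.countP_map]; rfl]
      conv_lhs => rw [← PySem.List.map_snd_enumerate (bars.map pvEndpoints) 0]
      rw [List.countP_map]
      rfl
    rw [this]
  simp only [PySem.Set.len, hlen, hClen]
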